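-- pv_equiv track=rewrite | github.com/rende55/EulerYeni | euler_196.py | liste_yap
-- ===== SOURCE A (Python) =====
-- def baslangic_sayisi(n):
--     bosluk = 0
--     for i in range(1,n):
--         bosluk += i
--     return(n**2 - (bosluk+n-1))
--
-- def liste_yap(n):
--     liste = []
--     for nx in range((n-2),(n+3)):
--         sayi = nx
--         baslangic = baslangic_sayisi(nx)
--         l1 = list()
--         for i in range (baslangic,baslangic+sayi):
--             l1.append(i)
--         liste.append(l1)
--     return liste
-- ===== SOURCE B (Python) =====
-- def liste_yap(n):
--     return [list(range(nx*(nx-1)//2 + 1, nx*(nx-1)//2 + 1 + nx))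
--             for nx in range(n-2, n+3)]
-- ===== Notes on version B (the rewrite author's own statement) =====
-- stated objective: faster
-- what changed: Replaced the baslangic_sayisi helper with its per-row summation loop and the inner append loop by the closed-form triangular-number start and a direct range construction in a single comprehension pass.
import Mathlib
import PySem

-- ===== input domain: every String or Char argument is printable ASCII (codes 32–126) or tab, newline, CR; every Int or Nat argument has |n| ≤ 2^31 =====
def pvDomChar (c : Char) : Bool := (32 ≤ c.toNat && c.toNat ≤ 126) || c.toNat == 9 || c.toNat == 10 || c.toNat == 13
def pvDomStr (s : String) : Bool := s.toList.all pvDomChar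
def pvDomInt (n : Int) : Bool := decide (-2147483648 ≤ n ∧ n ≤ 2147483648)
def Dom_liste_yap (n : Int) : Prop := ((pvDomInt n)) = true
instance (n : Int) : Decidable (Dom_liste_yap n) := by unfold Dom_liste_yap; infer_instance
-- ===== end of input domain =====

-- B replaces A's per-row summation helper by the closed-form triangular start
-- nx*(nx-1)//2 + 1 and builds each row directly with range (objective: faster).

-- ===== PORT A =====
def baslangic_sayisi (n : Int) : Int :=
  let bosluk := (PySem.List.pyRange 1 n 1).foldl (fun b i => b + i) 0
  n ^ 2 - (bosluk + n - 1)

def liste_yap (n : Int) : List (List Int) :=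
  (PySem.List.pyRange (n - 2) (n + 3) 1).foldl (fun liste nx =>
    let sayi := nx
    let baslangic := baslangic_sayisi nx
    let l1 := (PySem.List.pyRange baslangic (baslangic + sayi) 1).foldl
      (fun l i => l ++ [i]) []
    liste ++ [l1]) []

-- ===== PORT B =====
def liste_yap_alt (n : Int) : List (List Int) :=
  (PySem.List.pyRange (n - 2) (n + 3) 1).map (fun nx =>
    let start := PySem.Int.floordiv (nx * (nx - 1)) 2 + 1
    PySem.List.pyRange start (start + nx) 1)

-- ===== PRECONDITION & SPEC =====
def Spec_liste_yap (n : Int) (out : List (List Int)) : Prop := out = liste_yap_alt n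
instance (n : Int) (out : List (List Int)) : Decidable (Spec_liste_yap n out) := by unfold Spec_liste_yap; infer_instance

-- ===== CLAIM (what is proved, stated in full; the proofs are below) =====
def Claim_equal_liste_yap : Prop := ∀ (n : Int), Dom_liste_yap n → Spec_liste_yap n (liste_yap n)

-- ===== LEMMAS AND PROOFS =====

-- the closed form of B's start value: floordiv (nx*(nx-1)) 2 is exact division
theorem floordiv_sq_pred (nx : Int) :
    2 * PySem.Int.floordiv (nx * (nx - 1)) 2 = nx * (nx - 1) := by
  obtain ⟨q, hq⟩ : Even (nx * (nx - 1)) := by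
    have h := Int.even_mul_succ_self (nx - 1)
    simpa [mul_comm] using h
  have hq2 : nx * (nx - 1) = 2 * q := by omega
  rw [hq2, PySem.Int.floordiv_eq_ediv_of_pos (by norm_num : (0:Int) < 2),
    Int.mul_ediv_cancel_left q (by norm_num : (2:Int) ≠ 0)]

-- Gauss: twice the sum of range(1, nx) is nx*(nx-1) for 1 ≤ nx
theorem sum_range_one (k : Nat) :
    (((List.range k).map (fun i : Nat => (1 : Int) + i)).foldl (fun b i => b + i) 0) * 2
      = (k : Int) * (k + 1) := by
  induction k with
  | zero => simp
  | succ m ih =>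
    rw [List.range_succ, List.map_append, List.foldl_append]
    simp only [List.map_cons, List.map_nil, List.foldl_cons, List.foldl_nil]
    push_cast
    push_cast at ih
    nlinarith [ih]

theorem baslangic_closed (nx : Int) (h : 1 ≤ nx) :
    baslangic_sayisi nx = PySem.Int.floordiv (nx * (nx - 1)) 2 + 1 := by
  unfold baslangic_sayisi
  rw [PySem.List.pyRange_one]
  have hs := sum_range_one (nx - 1).toNat
  have hc : ((nx - 1).toNat : Int) = nx - 1 := by omega
  rw [hc] at hs
  have hf := floordiv_sq_pred nx
  simp only []
  nlinarith [hs, hf]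

-- each row of A equals the corresponding row of B
theorem row_eq (nx : Int) :
    (PySem.List.pyRange (baslangic_sayisi nx) (baslangic_sayisi nx + nx) 1).foldl
      (fun l i => l ++ [i]) ([] : List Int)
    = PySem.List.pyRange (PySem.Int.floordiv (nx * (nx - 1)) 2 + 1)
        (PySem.Int.floordiv (nx * (nx - 1)) 2 + 1 + nx) 1 := by
  rw [PySem.List.foldl_append_singleton_eq_self, List.nil_append]
  by_cases h : 1 ≤ nx
  · rw [baslangic_closed nx h]
  · rw [PySem.List.pyRange_one_eq_nil (by omega), PySem.List.pyRange_one_eq_nil (by omega)]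

-- ===== VERDICT (by name: the statement is the Claim_ definition above) =====
theorem liste_yap_spec : Claim_equal_liste_yap := by
  intro n _
  unfold Spec_liste_yap liste_yap liste_yap_alt
  rw [PySem.List.foldl_append_singleton_eq_map, List.nil_append]
  exact List.map_congr_left (fun nx _ => row_eq nx)
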